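-- pv_equiv track=rewrite | github.com/UARR7/Project-Work-1 | docs_generator.py | _extract_csharp_comment
-- ===== SOURCE A (Python) =====
-- from typing import Dict, List, Optional, Any
--
-- def _extract_csharp_comment(lines: List[str], line_index: int) -> str:
--     """Extract C# XML documentation comment"""
--     comment = ''
--     # Look for XML doc comments above the method/class
--     for i in range(max(0, line_index - 10), line_index):
--         line = lines[i].strip()
--         if line.startswith('///'):
--             # Start of XML doc comment
--             comment_lines = []
--             for j in range(i, line_index):
--                 if lines[j].strip().startswith('///'):
--                     comment_lines.append(lines[j])
--                 else:
--                     break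
--             comment = '\n'.join(comment_lines)
--             break
--     return comment
-- ===== SOURCE B (Python) =====
-- def _extract_csharp_comment(lines, line_index):
--     """Extract C# XML documentation comment"""
--     comment_lines = []
--     started = False
--     for i in range(max(0, line_index - 10), line_index):
--         if lines[i].strip().startswith('///'):
--             comment_lines.append(lines[i])
--             started = True
--         elif started:
--             break
--     return '\n'.join(comment_lines)
-- ===== Notes on version B (the rewrite author's own statement) =====
-- stated objective: simpler
-- what changed: Replaces A's find-first-hit outer scan plus separate inner collection loop with one state-driven pass that keeps a 'started' flag and collects the first contiguous '///' block directly; Pre_ admits exactly the inputs where A returns (excluding only the line_index > len(lines) inputs where both A and B raise IndexError).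
import Mathlib
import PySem

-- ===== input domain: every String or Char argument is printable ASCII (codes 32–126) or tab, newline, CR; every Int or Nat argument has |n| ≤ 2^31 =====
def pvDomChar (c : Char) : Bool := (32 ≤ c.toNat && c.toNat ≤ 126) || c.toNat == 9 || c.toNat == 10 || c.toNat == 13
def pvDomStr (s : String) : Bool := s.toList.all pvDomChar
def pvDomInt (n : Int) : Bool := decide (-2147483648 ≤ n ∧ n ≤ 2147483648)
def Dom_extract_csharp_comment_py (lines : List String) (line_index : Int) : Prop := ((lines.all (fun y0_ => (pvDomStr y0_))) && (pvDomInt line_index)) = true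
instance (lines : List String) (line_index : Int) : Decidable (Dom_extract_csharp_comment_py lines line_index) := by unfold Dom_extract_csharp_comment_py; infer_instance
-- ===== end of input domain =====

-- B replaces A's find-first-hit scan + separate inner collection loop with one state-driven pass (a 'started' flag); same return value, no speed claim.


-- ===== PORT A =====
-- inner loop: for j in range(i, line_index): append while lines[j].strip().startswith('///'), else break
def pvInnerA (lines : List String) : List Int → List String
  | [] => []
  | j :: rest =>
    if PySem.Str.startswith (PySem.Str.strip (PySem.List.pyGetD lines j "")) "///" then
      PySem.List.pyGetD lines j "" :: pvInnerA lines rest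
    else []

-- outer loop: for i in range(max(0, line_index-10), line_index): find the first '///' line, then join the inner collection
def pvOuterA (lines : List String) (line_index : Int) : List Int → String
  | [] => ""
  | i :: rest =>
    if PySem.Str.startswith (PySem.Str.strip (PySem.List.pyGetD lines i "")) "///" then
      PySem.Str.join "\n" (pvInnerA lines (PySem.List.pyRange i line_index 1))
    else pvOuterA lines line_index rest

def extract_csharp_comment_py (lines : List String) (line_index : Int) : String :=
  pvOuterA lines line_index (PySem.List.pyRange (max 0 (line_index - 10)) line_index 1)

-- ===== PORT B =====
-- single pass with a 'started' flag and an accumulator of collected raw lines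
def pvLoopB (lines : List String) : List Int → Bool → List String → List String
  | [], _, acc => acc
  | i :: rest, started, acc =>
    if PySem.Str.startswith (PySem.Str.strip (PySem.List.pyGetD lines i "")) "///" then
      pvLoopB lines rest true (acc ++ [PySem.List.pyGetD lines i ""])
    else if started then acc
    else pvLoopB lines rest started acc

def extract_csharp_comment_py_alt (lines : List String) (line_index : Int) : String :=
  PySem.Str.join "\n" (pvLoopB lines (PySem.List.pyRange (max 0 (line_index - 10)) line_index 1) false [])

-- ===== PRECONDITION & SPEC =====
-- is this line a '///' doc line? (used only to state Pre_)
def pvDoc (s : String) : Bool := PySem.Str.startswith (PySem.Str.strip s) "///"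

-- Pre_ admits exactly the inputs where Python A returns: either line_index ≤ len(lines), or (line_index past the
-- end) the window holds a '///' line followed by a non-'///' line before the end, so both scans break before the
-- out-of-range index; on all other inputs A (and B) raise IndexError from lines[i].
def Pre_extract_csharp_comment_py (lines : List String) (line_index : Int) : Prop :=
  line_index ≤ (lines.length : Int) ∨
    ∃ i < lines.length, ∃ j < lines.length,
      max 0 (line_index - 10) ≤ (i : Int) ∧ i < j ∧
      pvDoc (lines.getD i "") = true ∧ pvDoc (lines.getD j "") = false
instance (lines : List String) (line_index : Int) : Decidable (Pre_extract_csharp_comment_py lines line_index) := by unfold Pre_extract_csharp_comment_py; infer_instance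

def pvWitness_extract_csharp_comment_py : List String × Int := (["/// <summary>", "/// docs", "void M()"], 2)

def Spec_extract_csharp_comment_py (lines : List String) (line_index : Int) (out : String) : Prop := out = extract_csharp_comment_py_alt lines line_index
instance (lines : List String) (line_index : Int) (out : String) : Decidable (Spec_extract_csharp_comment_py lines line_index out) := by unfold Spec_extract_csharp_comment_py; infer_instance

-- ===== CLAIM (what is proved, stated in full; the proofs are below) =====
def Claim_equal_extract_csharp_comment_py : Prop := ∀ (lines : List String) (line_index : Int), Dom_extract_csharp_comment_py lines line_index → Pre_extract_csharp_comment_py lines line_index → Spec_extract_csharp_comment_py lines line_index (extract_csharp_comment_py lines line_index)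

-- ===== LEMMAS AND PROOFS =====

-- B's loop, once started, collects exactly what A's inner loop collects.
theorem pvLoopB_started (lines : List String) (L : List Int) (acc : List String) :
    pvLoopB lines L true acc = acc ++ pvInnerA lines L := by
  induction L generalizing acc with
  | nil => simp [pvLoopB, pvInnerA]
  | cons j rest ih =>
    simp only [pvLoopB, pvInnerA]
    split_ifs with h
    · simp [ih]
    · simp

-- main invariant over the tail range(k, line_index)
theorem pvMain (lines : List String) (li : Int) :
    ∀ (n : Nat) (k : Int), (li - k).toNat = n →
      pvOuterA lines li (PySem.List.pyRange k li 1) =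
      PySem.Str.join "\n" (pvLoopB lines (PySem.List.pyRange k li 1) false []) := by
  intro n
  induction n with
  | zero =>
    intro k hk
    rw [PySem.List.pyRange_one_eq_nil (by omega)]
    simp [pvOuterA, pvLoopB, PySem.Str.join]
  | succ m ih =>
    intro k hk
    have hklt : k < li := by omega
    rw [PySem.List.pyRange_one_cons hklt]
    by_cases h : PySem.Str.startswith (PySem.Str.strip (PySem.List.pyGetD lines k "")) "///"
    · simp only [pvOuterA, pvLoopB, h, if_pos]
      rw [pvLoopB_started, PySem.List.pyRange_one_cons hklt]
      simp only [pvInnerA, h, if_pos, List.nil_append, List.singleton_append]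
    · simp only [pvOuterA, pvLoopB, h, Bool.false_eq_true, if_false]
      exact ih (k + 1) (by omega)

-- ===== VERDICT (by name: the statement is the Claim_ definition above) =====
theorem extract_csharp_comment_py_spec : Claim_equal_extract_csharp_comment_py := by
  intro lines li _ _
  unfold Spec_extract_csharp_comment_py extract_csharp_comment_py extract_csharp_comment_py_alt
  exact pvMain lines li _ (max 0 (li - 10)) rfl
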